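-- pv_equiv track=rewrite | github.com/Alejo-UTN/Parser_test | Lexer_tp.py | afdtoken11
-- ===== SOURCE A (Python) =====
-- estadofinal = "estado_final"
--
-- estadonofinal = "estado2 no aceptado"
--
-- estadotrampa = "esta en estado2 trampa"
--
-- def afdtoken11(lexema):
--     estado11 = 0
--     estadofinal11 = [4]
--     for caracter in lexema :
--         if estado11 == 0 and caracter == 'f':
--             estado11 = 1
--         elif estado11 == 1 and caracter == 'u':
--             estado11 = 2
--         elif estado11 == 2 and caracter == 'n':
--             estado11 = 3
--         elif estado11 == 3 and caracter == 'c':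
--             estado11 = 4
--         else:
--             estado11 = -1
--             break
--     if estado11 == -1 :
--             return estadotrampa
--     if estado11 in estadofinal11:
--             return estadofinal
--     else:
--             return estadonofinal
-- ===== SOURCE B (Python) =====
-- estadofinal = "estado_final"
-- estadonofinal = "estado2 no aceptado"
-- estadotrampa = "esta en estado2 trampa"
--
-- def afdtoken11(lexema):
--     chars = list(lexema)
--     target = list("func")
--     if chars == target:
--         return estadofinal
--     if chars == target[:len(chars)]:
--         return estadonofinal
--     return estadotrampa
-- ===== Notes on version B (the rewrite author's own statement) =====
-- stated objective: simpler
-- what changed: Replaces the per-character DFA state machine with a direct whole-value comparison: the input's character list is compared for equality with list("func") and then with its length-truncated prefix.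
import Mathlib
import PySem

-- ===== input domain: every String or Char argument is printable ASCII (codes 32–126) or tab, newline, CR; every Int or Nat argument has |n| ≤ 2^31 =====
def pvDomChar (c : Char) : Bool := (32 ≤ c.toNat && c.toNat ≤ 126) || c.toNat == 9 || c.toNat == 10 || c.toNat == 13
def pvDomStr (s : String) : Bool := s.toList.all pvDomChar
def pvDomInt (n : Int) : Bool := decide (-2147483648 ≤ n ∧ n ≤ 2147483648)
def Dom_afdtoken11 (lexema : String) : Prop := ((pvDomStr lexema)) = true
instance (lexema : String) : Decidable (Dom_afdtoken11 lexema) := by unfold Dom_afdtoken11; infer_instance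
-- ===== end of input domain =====

-- B replaces A's per-character DFA with a direct equality/prefix comparison against list "func"; objective: simpler.

-- ===== PORT A =====
-- the DFA loop of A: state updates per character, 'break' modelled by stopping at -1
def afdLoop11 : Int → List Char → Int
  | s, [] => s
  | s, c :: rest =>
    if s = 0 ∧ c = 'f' then afdLoop11 1 rest
    else if s = 1 ∧ c = 'u' then afdLoop11 2 rest
    else if s = 2 ∧ c = 'n' then afdLoop11 3 rest
    else if s = 3 ∧ c = 'c' then afdLoop11 4 rest
    else -1

def afdtoken11 (lexema : String) : String :=
  let estado11 := afdLoop11 0 lexema.toList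
  if estado11 = -1 then "esta en estado2 trampa"
  else if estado11 ∈ [(4 : Int)] then "estado_final"
  else "estado2 no aceptado"

-- ===== PORT B =====
def afdtoken11_alt (lexema : String) : String :=
  let chars := lexema.toList
  let target := "func".toList
  if chars = target then "estado_final"
  else if chars = target.take chars.length then "estado2 no aceptado"
  else "esta en estado2 trampa"

-- ===== PRECONDITION & SPEC =====
def Spec_afdtoken11 (lexema : String) (out : String) : Prop := out = afdtoken11_alt lexema
instance (lexema : String) (out : String) : Decidable (Spec_afdtoken11 lexema out) := by unfold Spec_afdtoken11; infer_instance

-- ===== CLAIM (what is proved, stated in full; the proofs are below) =====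
def Claim_equal_afdtoken11 : Prop := ∀ (lexema : String), Dom_afdtoken11 lexema → Spec_afdtoken11 lexema (afdtoken11 lexema)

-- ===== LEMMAS AND PROOFS =====

-- both sides as functions of the character list
def aCore (cs : List Char) : String :=
  let s := afdLoop11 0 cs
  if s = -1 then "esta en estado2 trampa"
  else if s ∈ [(4 : Int)] then "estado_final"
  else "estado2 no aceptado"

def bCore (cs : List Char) : String :=
  if cs = "func".toList then "estado_final"
  else if cs = "func".toList.take cs.length then "estado2 no aceptado"
  else "esta en estado2 trampa"

theorem funcList : "func".toList = ['f','u','n','c'] := by decide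

theorem core_eq (cs : List Char) : aCore cs = bCore cs := by
  match cs with
  | [] => decide
  | c0 :: t0 =>
    by_cases h0 : c0 = 'f'
    · subst h0
      match t0 with
      | [] => decide
      | c1 :: t1 =>
        by_cases h1 : c1 = 'u'
        · subst h1
          match t1 with
          | [] => decide
          | c2 :: t2 =>
            by_cases h2 : c2 = 'n'
            · subst h2
              match t2 with
              | [] => decide
              | c3 :: t3 =>
                by_cases h3 : c3 = 'c'
                · subst h3
                  match t3 with
                  | [] => decide
                  | c4 :: t4 =>
                    simp [aCore, bCore, afdLoop11, funcList, List.take]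
                · simp [aCore, bCore, afdLoop11, h3, funcList]
            · simp [aCore, bCore, afdLoop11, h2, funcList]
        · simp [aCore, bCore, afdLoop11, h1, funcList]
    · simp [aCore, bCore, afdLoop11, h0, funcList]

-- ===== VERDICT (by name: the statement is the Claim_ definition above) =====
theorem afdtoken11_spec : Claim_equal_afdtoken11 := by
  intro lexema _
  show afdtoken11 lexema = afdtoken11_alt lexema
  have h := core_eq lexema.toList
  simpa [aCore, bCore, afdtoken11, afdtoken11_alt] using h
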